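-- pv_equiv track=rewrite | github.com/libou584/advent-of-code-2023 | day14/prob2.py | roll_left
-- ===== SOURCE A (Python) =====
-- def roll_left(M) :
--     for col in range(1, len(M[0])) :
--         for i in range(len(M)) :
--             if M[i][col] == 'O' :
--                 j = col
--                 M[i][col] = '.'
--                 while j >= 0 and M[i][j] == '.' :
--                     j -= 1
--                 M[i][j+1] = 'O'
--     return M
-- ===== SOURCE B (Python) =====
-- def roll_left(M):
--     # grid width is len(M[0]), as in the original: rocks roll within columns 0..width-1
--     width = len(M[0]) if M else 0
--     res = []
--     for row in M:
--         new = list(row)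
--         free = 0  # next free landing index in the current run
--         for k, c in enumerate(row[:width]):
--             if c == 'O':
--                 new[k] = '.'
--                 new[free] = 'O'
--                 free += 1
--             elif c != '.':
--                 free = k + 1
--         res.append(new)
--     return res
-- ===== Notes on version B (the rewrite author's own statement) =====
-- stated objective: alternative
-- what changed: Replaced the per-column outer loop with an inner leftward rescan of each 'O' by a single left-to-right pass per row tracking the next free landing index, building fresh rows instead of mutating.
import Mathlib
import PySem

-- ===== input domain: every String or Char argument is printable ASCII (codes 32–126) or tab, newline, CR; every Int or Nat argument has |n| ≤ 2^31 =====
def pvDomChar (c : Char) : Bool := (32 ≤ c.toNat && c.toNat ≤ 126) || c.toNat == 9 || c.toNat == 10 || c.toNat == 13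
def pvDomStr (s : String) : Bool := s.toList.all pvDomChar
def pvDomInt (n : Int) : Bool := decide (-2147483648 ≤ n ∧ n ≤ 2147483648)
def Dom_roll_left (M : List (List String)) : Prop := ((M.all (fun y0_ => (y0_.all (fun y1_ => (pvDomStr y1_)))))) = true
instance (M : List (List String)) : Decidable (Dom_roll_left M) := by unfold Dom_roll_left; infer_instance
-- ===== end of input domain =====

-- B rolls each row in one left-to-right pass tracking the next free landing index, instead of A's
-- per-column passes with a leftward rescan per 'O'; the equivalence is about the RETURN value only
-- (A mutates M in place, B builds fresh rows).

-- ===== PORT A =====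
-- Python's inner `while j >= 0 and M[i][j] == '.': j -= 1` followed by the write at `j+1`:
-- aFind returns that landing index (0 if the scan runs off the left edge).
def aFind (row : List String) : Nat → Nat
  | 0 => if row.getD 0 "" == "." then 0 else 1
  | (j+1) => if row.getD (j+1) "" == "." then aFind row j else j + 2

-- body of A's `if M[i][col] == 'O'` on one row: M[i][col] = '.' then M[i][j+1] = 'O'
-- (loop indices are nonnegative ints, so `.toNat` at the call sites below is exact)
def aColStep (c : Nat) (row : List String) : List String :=
  if row.getD c "" == "O" then
    (row.set c ".").set (aFind (row.set c ".") c) "O"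
  else row

def roll_left (M : List (List String)) : List (List String) :=
  (PySem.List.pyRange 1 (((M.headD []).length : Int)) 1).foldl
    (fun acc col =>
      (PySem.List.pyRange 0 ((acc.length : Int)) 1).foldl
        (fun acc2 i => acc2.set i.toNat (aColStep col.toNat (acc2.getD i.toNat []))) acc)
    M

-- ===== PORT B =====
-- one step of B's `for k, c in enumerate(row)` with state (new, free)
def bStep (st : List String × Nat) (kc : Int × String) : List String × Nat :=
  if kc.2 == "O" then ((st.1.set kc.1.toNat ".").set st.2 "O", st.2 + 1)
  else if kc.2 != "." then (st.1, kc.1.toNat + 1)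
  else st

-- row[:width] with a nonnegative width is exactly List.take
def bRow (w : Nat) (row : List String) : List String :=
  ((PySem.List.enumerate (row.take w) 0).foldl bStep (row, 0)).1

-- Python's `width = len(M[0]) if M else 0` (headD [] is [] exactly when M is empty)
def roll_left_alt (M : List (List String)) : List (List String) :=
  M.foldl (fun res row => res ++ [bRow (M.headD []).length row]) []

-- ===== PRECONDITION & SPEC =====
-- Pre_ is exactly the inputs on which A returns (no IndexError): M nonempty and, when the first
-- row has at least 2 cells, no row shorter than the first row.
def Pre_roll_left (M : List (List String)) : Prop :=
  M ≠ [] ∧ ((M.headD []).length ≤ 1 ∨ ∀ r ∈ M, (M.headD []).length ≤ r.length)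
instance (M : List (List String)) : Decidable (Pre_roll_left M) := by
  unfold Pre_roll_left; infer_instance
def pvWitness_roll_left : List (List String) := [[".", "O"], ["#", "O"]]

def Spec_roll_left (M : List (List String)) (out : List (List String)) : Prop := out = roll_left_alt M
instance (M : List (List String)) (out : List (List String)) : Decidable (Spec_roll_left M out) := by unfold Spec_roll_left; infer_instance

-- ===== CLAIM (what is proved, stated in full; the proofs are below) =====
def Claim_equal_roll_left : Prop := ∀ (M : List (List String)), Dom_roll_left M → Pre_roll_left M → Spec_roll_left M (roll_left M)

-- ===== LEMMAS AND PROOFS =====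

def aRow (m : Nat) (row : List String) : List String :=
  (List.range m).foldl (fun r k => aColStep (k+1) r) row

def Bst (k : Nat) (row : List String) : List String × Nat :=
  (PySem.List.enumerate (row.take k) 0).foldl bStep (row, 0)

theorem getD_set_self (l : List String) (i : Nat) (v d : String) (h : i < l.length) :
    (l.set i v).getD i d = v := by
  simp [List.getD_eq_getElem?_getD, h]

theorem getD_set_ne (l : List String) {i j : Nat} (v d : String) (h : i ≠ j) :
    (l.set i v).getD j d = l.getD j d := by
  simp [List.getD_eq_getElem?_getD, List.getElem?_set_ne h]

theorem aFind_spec (r : List String) (f : Nat) : ∀ (c : Nat), f ≤ c →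
    (∀ j, f ≤ j → j ≤ c → r.getD j "" = ".") →
    (f = 0 ∨ r.getD (f-1) "" ≠ ".") → aFind r c = f
  | 0, hfc, hdots, hleft => by
      interval_cases f
      have h0 : r.getD 0 "" = "." := hdots 0 le_rfl le_rfl
      rw [List.getD_eq_getElem?_getD] at h0
      simp [aFind, h0]
  | (c+1), hfc, hdots, hleft => by
      have hdot : r.getD (c+1) "" = "." := hdots (c+1) hfc le_rfl
      rw [List.getD_eq_getElem?_getD] at hdot
      rw [aFind, if_pos (by simp [List.getD_eq_getElem?_getD, hdot])]
      rcases Nat.lt_or_ge f (c+1) with hf | hf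
      · exact aFind_spec r f c (by omega) (fun j h1 h2 => hdots j h1 (by omega)) hleft
      · -- f = c+1
        have hfe : f = c + 1 := le_antisymm hfc hf
        subst hfe
        rcases hleft with h0 | hne
        · omega
        · simp only [Nat.add_sub_cancel] at hne
          rw [List.getD_eq_getElem?_getD] at hne
          cases c with
          | zero => simp [aFind, hne]
          | succ j => rw [aFind, if_neg (by simpa [List.getD_eq_getElem?_getD] using hne)]

theorem Bst_zero (row : List String) : Bst 0 row = (row, 0) := by
  simp [Bst, PySem.List.enumerate_nil]

theorem Bst_succ (row : List String) (k : Nat) (h : k < row.length) :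
    Bst (k+1) row = bStep (Bst k row) ((k : Int), row.getD k "") := by
  unfold Bst
  rw [List.take_add_one, List.getElem?_eq_getElem h]
  simp only [Option.toList_some]
  rw [PySem.List.enumerate_append]
  rw [List.foldl_append]
  have hl : (row.take k).length = k := by simp [List.length_take]; omega
  simp [PySem.List.enumerate_cons, PySem.List.enumerate_nil, hl,
    List.getD_eq_getElem?_getD, List.getElem?_eq_getElem h]

theorem aRow_succ (m : Nat) (row : List String) :
    aRow (m+1) row = aColStep (m+1) (aRow m row) := by
  simp [aRow, List.range_succ]

theorem core (row : List String) : ∀ (m : Nat), m < row.length →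
    (Bst (m+1) row).1 = aRow m row
    ∧ (Bst (m+1) row).1.length = row.length
    ∧ (Bst (m+1) row).2 ≤ m+1
    ∧ (∀ j, m+1 ≤ j → (Bst (m+1) row).1.getD j "" = row.getD j "")
    ∧ (∀ j, (Bst (m+1) row).2 ≤ j → j ≤ m → (Bst (m+1) row).1.getD j "" = ".")
    ∧ ((Bst (m+1) row).2 = 0 ∨ (Bst (m+1) row).1.getD ((Bst (m+1) row).2 - 1) "" ≠ ".")
  | 0, h => by
    rw [Bst_succ row 0 h, Bst_zero]
    have hset : row.set 0 (row.getD 0 "") = row := by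
      rw [List.getD_eq_getElem _ _ h]; exact List.set_getElem_self ..
    by_cases hO : row.getD 0 "" = "O"
    · have hO' : row[0]?.getD "" = "O" := by
        simpa [List.getD_eq_getElem?_getD] using hO
      have hrow : (row.set 0 ".").set 0 "O" = row := by
        rw [List.set_set, ← hO, hset]
      have hstep : bStep (row, 0) (((0 : Nat) : Int), row.getD 0 "") = (row, 1) := by
        simp [bStep, List.getD_eq_getElem?_getD, hO', hrow]
      rw [hstep]
      refine ⟨by simp [aRow], rfl, by omega, fun j hj => rfl,
        fun j hj1 hj2 => by omega, Or.inr ?_⟩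
      show row.getD (1-1) "" ≠ "."
      rw [show (1:Nat)-1 = 0 from rfl, hO]
      decide
    · have hO' : ¬ row[0]?.getD "" = "O" := by
        simpa [List.getD_eq_getElem?_getD] using hO
      by_cases hD : row.getD 0 "" = "."
      · have hD' : row[0]?.getD "" = "." := by
          simpa [List.getD_eq_getElem?_getD] using hD
        have hstep : bStep (row, 0) (((0 : Nat) : Int), row.getD 0 "") = (row, 0) := by
          simp [bStep, List.getD_eq_getElem?_getD, hD']
        rw [hstep]
        refine ⟨by simp [aRow], rfl, by omega, fun j hj => rfl, ?_, Or.inl rfl⟩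
        intro j hj1 hj2
        have hj0 : j = 0 := by omega
        subst hj0; exact hD
      · have hD' : ¬ row[0]?.getD "" = "." := by
          simpa [List.getD_eq_getElem?_getD] using hD
        have hstep : bStep (row, 0) (((0 : Nat) : Int), row.getD 0 "") = (row, 1) := by
          simp [bStep, List.getD_eq_getElem?_getD, hO', hD']
        rw [hstep]
        refine ⟨by simp [aRow], rfl, by omega, fun j hj => rfl,
          fun j hj1 hj2 => by omega, Or.inr ?_⟩
        simpa using hD
  | (m+1), h => by
    obtain ⟨h1, h2, h3, h4, h5, h6⟩ := core row m (by omega)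
    rw [Bst_succ row (m+1) h]
    set B := Bst (m+1) row with hB
    have hx : B.1.getD (m + 1) "" = row.getD (m + 1) "" := h4 (m+1) le_rfl
    by_cases hO : row.getD (m + 1) "" = "O"
    · have hO' : row[m+1]?.getD "" = "O" := by
        simpa [List.getD_eq_getElem?_getD] using hO
      have hstep : bStep B ((↑(m+1) : Int), row.getD (m + 1) "")
          = ((B.1.set (m+1) ".").set B.2 "O", B.2 + 1) := by
        simp [bStep, List.getD_eq_getElem?_getD, hO']
      have hcond : (B.1.getD (m + 1) "" == "O") = true := by
        rw [hx, hO]; decide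
      have hfind : aFind (B.1.set (m + 1) ".") (m + 1) = B.2 := by
        apply aFind_spec _ _ _ h3
        · intro j hj1 hj2
          rcases Nat.lt_or_ge j (m + 1) with hj | hj
          · rw [getD_set_ne _ _ _ (by omega)]
            exact h5 j hj1 (by omega)
          · have hje : j = m + 1 := by omega
            subst hje
            exact getD_set_self _ _ _ _ (by omega)
        · rcases h6 with h0 | hne
          · exact Or.inl h0
          · refine Or.inr ?_
            rw [getD_set_ne _ _ _ (by omega)]
            exact hne
      have hA : aColStep (m + 1) B.1 = (B.1.set (m + 1) ".").set B.2 "O" := by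
        rw [aColStep, if_pos hcond, hfind]
      rw [hstep]
      refine ⟨?_, ?_, by simpa using by omega, ?_, ?_, Or.inr ?_⟩
      · show (B.1.set (m+1) ".").set B.2 "O" = aRow (m+1) row
        rw [aRow_succ, ← h1, hA]
      · simp [h2]
      · intro j hj
        show ((B.1.set (m+1) ".").set B.2 "O").getD j "" = row.getD j ""
        rw [getD_set_ne _ _ _ (by omega), getD_set_ne _ _ _ (by omega)]
        exact h4 j (by omega)
      · intro j hj1 hj2
        show ((B.1.set (m+1) ".").set B.2 "O").getD j "" = "."
        simp only at hj1
        rw [getD_set_ne _ _ _ (by omega)]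
        rcases Nat.lt_or_ge j (m + 1) with hj | hj
        · rw [getD_set_ne _ _ _ (by omega)]
          exact h5 j (by omega) (by omega)
        · have hje : j = m + 1 := by omega
          subst hje
          exact getD_set_self _ _ _ _ (by omega)
      · show ((B.1.set (m+1) ".").set B.2 "O").getD (B.2 + 1 - 1) "" ≠ "."
        rw [Nat.add_sub_cancel, getD_set_self _ _ _ _ (by simp [h2]; omega)]
        decide
    · have hO' : ¬ row[m+1]?.getD "" = "O" := by
        simpa [List.getD_eq_getElem?_getD] using hO
      have hcond : ¬ (B.1.getD (m + 1) "" == "O") = true := by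
        simp only [beq_iff_eq, hx]
        exact hO
      have hA : aColStep (m + 1) B.1 = B.1 := by
        rw [aColStep, if_neg hcond]
      by_cases hD : row.getD (m + 1) "" = "."
      · have hD' : row[m+1]?.getD "" = "." := by
          simpa [List.getD_eq_getElem?_getD] using hD
        have hstep : bStep B ((↑(m+1) : Int), row.getD (m + 1) "") = B := by
          simp [bStep, List.getD_eq_getElem?_getD, hD']
        rw [hstep]
        refine ⟨?_, h2, by omega, ?_, ?_, h6⟩
        · rw [aRow_succ, ← h1, hA, h1]
        · intro j hj; exact h4 j (by omega)
        · intro j hj1 hj2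
          rcases Nat.lt_or_ge j (m + 1) with hj | hj
          · exact h5 j hj1 (by omega)
          · have hje : j = m + 1 := by omega
            subst hje
            rw [hx, hD]
      · have hD' : ¬ row[m+1]?.getD "" = "." := by
          simpa [List.getD_eq_getElem?_getD] using hD
        have hstep : bStep B ((↑(m+1) : Int), row.getD (m + 1) "") = (B.1, m + 2) := by
          simp [bStep, List.getD_eq_getElem?_getD, hO', hD']
        rw [hstep]
        refine ⟨?_, h2, by omega, ?_, ?_, Or.inr ?_⟩
        · show B.1 = aRow (m+1) row
          rw [aRow_succ, ← h1, hA]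
        · intro j hj; exact h4 j (by omega)
        · intro j hj1 hj2; simp only at hj1; omega
        · show B.1.getD (m + 2 - 1) "" ≠ "."
          rw [show m + 2 - 1 = m + 1 from rfl, hx]
          exact hD

theorem aColStep_nil (c : Nat) : aColStep c [] = [] := by
  simp [aColStep]

theorem aRow_nil : ∀ (m : Nat), aRow m [] = []
  | 0 => rfl
  | (m+1) => by rw [aRow_succ, aRow_nil m, aColStep_nil]

theorem bRow_eq_Bst (w : Nat) (row : List String) : bRow w row = (Bst w row).1 := rfl

theorem bRow_eq_aRow (w : Nat) (row : List String) (h : w ≤ row.length ∨ row = []) :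
    bRow w row = aRow (w - 1) row := by
  rcases h with h | rfl
  · cases w with
    | zero => simp [bRow, Bst, PySem.List.enumerate_nil, aRow]
    | succ m =>
      rw [bRow_eq_Bst]
      exact (core row m (by omega)).1
  · simp [bRow, PySem.List.enumerate_nil, aRow_nil]

theorem getD_append_len {α : Type} (pre : List α) (x : α) (xs : List α) (d : α) :
    (pre ++ x :: xs).getD pre.length d = x := by
  simp [List.getD_eq_getElem?_getD]

theorem set_append_len {α : Type} (pre : List α) (x : α) (xs : List α) (v : α) :
    (pre ++ x :: xs).set pre.length v = pre ++ v :: xs := by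
  induction pre with
  | nil => rfl
  | cons p ps ih => simp [ih]

theorem inner_map (g : List String → List String) :
    ∀ (xs pre : List (List String)),
      (PySem.List.pyRange (pre.length : Int) (((pre.length + xs.length : Nat) : Int)) 1).foldl
        (fun acc i => acc.set i.toNat (g (acc.getD i.toNat []))) (pre ++ xs)
      = pre ++ xs.map g
  | [], pre => by
      rw [PySem.List.pyRange_one_eq_nil (by simp)]
      simp
  | x :: xs, pre => by
      rw [PySem.List.pyRange_one_cons (by push_cast [List.length_cons]; omega), List.foldl_cons]
      have hacc : (pre ++ x :: xs).set ((pre.length : Int)).toNat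
          (g ((pre ++ x :: xs).getD ((pre.length : Int)).toNat [])) = (pre ++ [g x]) ++ xs := by
        simp only [Int.toNat_natCast]
        rw [getD_append_len, set_append_len]
        simp
      rw [hacc]
      have ih := inner_map g xs (pre ++ [g x])
      have e1 : (((pre ++ [g x]).length : Nat) : Int) = (pre.length : Int) + 1 := by
        simp
      have e2 : (((pre ++ [g x]).length + xs.length : Nat) : Int)
          = ((pre.length + (x :: xs).length : Nat) : Int) := by
        simp; ring
      rw [e1, e2] at ih
      rw [ih]
      simp

theorem inner_map' (g : List String → List String) (xs : List (List String)) :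
    (PySem.List.pyRange 0 ((xs.length : Int)) 1).foldl
      (fun acc i => acc.set i.toNat (g (acc.getD i.toNat []))) xs = xs.map g := by
  have := inner_map g xs []
  simpa using this

theorem foldl_map_exch (f : Int → List String → List String) :
    ∀ (L : List Int) (M : List (List String)),
      L.foldl (fun acc c => acc.map (f c)) M = M.map (fun row => L.foldl (fun r c => f c r) row)
  | [], M => by simp
  | c :: L, M => by
      rw [List.foldl_cons, foldl_map_exch f L (M.map (f c)), List.map_map]
      rfl

theorem roll_left_eq_map (M : List (List String)) :
    roll_left M = M.map (fun row => aRow ((M.headD []).length - 1) row) := by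
  unfold roll_left
  simp only [inner_map']
  rw [foldl_map_exch]
  apply List.map_congr_left
  intro row _
  rw [PySem.List.pyRange_one, List.foldl_map]
  rw [show ((((M.headD []).length : Nat) : Int) - 1).toNat = (M.headD []).length - 1 from by omega]
  have hfun : (fun (r : List String) (k : Nat) => aColStep (((1 : Int) + k).toNat) r)
      = (fun (r : List String) (k : Nat) => aColStep (k + 1) r) := by
    funext r k
    congr 1
    omega
  rw [hfun]
  rfl

theorem roll_left_alt_eq (M : List (List String)) :
    roll_left_alt M = M.map (bRow (M.headD []).length) := by
  unfold roll_left_alt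
  rw [PySem.List.foldl_append_singleton_eq_map]
  simp

theorem main_thm (M : List (List String))
    (hu : (M.headD []).length ≤ 1 ∨ ∀ r ∈ M, (M.headD []).length ≤ r.length) :
    roll_left M = roll_left_alt M := by
  rw [roll_left_eq_map, roll_left_alt_eq]
  apply List.map_congr_left
  intro row hrow
  refine (bRow_eq_aRow _ row ?_).symm
  rcases hu with h1 | hall
  · rcases Nat.eq_zero_or_pos row.length with h0 | h0
    · exact Or.inr (List.eq_nil_of_length_eq_zero h0)
    · exact Or.inl (by omega)
  · exact Or.inl (hall row hrow)


-- ===== VERDICT (by name: the statement is the Claim_ definition above) =====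
theorem roll_left_spec : Claim_equal_roll_left := by
  intro M _ hpre
  unfold Spec_roll_left
  exact main_thm M hpre.2
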